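-- pv_equiv track=rewrite | github.com/francocuervoo/ip | practicas/ejercicios_parcial_02/practica_01.py | torneo_de_gallinas
-- ===== SOURCE A (Python) =====
-- def torneo_de_gallinas ( estrategias : dict[str, str]) -> dict[str, int]:
--     res : dict[str, int] = dict()
--
--     for jugador1 , estrategia1 in estrategias.items():
--         res[jugador1] = 0
--
--         for jugador2, estrategia2 in estrategias.items():
--             if not jugador1 == jugador2:
--                 if estrategia1 == "me desvio siempre" and estrategia1 == estrategia2:
--                     res[jugador1] += -10
--                 elif estrategia1 == "me la banco y no me desvio" and estrategia1 == estrategia2: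
--                     res[jugador1] += -5
--                 elif estrategia1 == "me desvio siempre" and estrategia2 == "me la banco y no me desvio":
--                     res[jugador1] += -15
--                 elif estrategia1 == "me la banco y no me desvio" and estrategia2 == "me desvio siempre":
--                     res[jugador1] += 10
--
--     return res
-- ===== SOURCE B (Python) =====
-- def torneo_de_gallinas(estrategias: dict[str, str]) -> dict[str, int]:
--     # Count each strategy once, then score every player with a closed formula: O(n) instead of A's O(n^2).
--     DESVIO = "me desvio siempre"
--     BANCO = "me la banco y no me desvio"
--     c_desvio = sum(1 for v in estrategias.values() if v == DESVIO)
--     c_banco = sum(1 for v in estrategias.values() if v == BANCO)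
--
--     def puntaje(s: str) -> int:
--         if s == DESVIO:
--             return -10 * (c_desvio - 1) - 15 * c_banco
--         if s == BANCO:
--             return -5 * (c_banco - 1) + 10 * c_desvio
--         return 0
--
--     return {jugador: puntaje(s) for jugador, s in estrategias.items()}
-- ===== Notes on version B (the rewrite author's own statement) =====
-- stated objective: faster
-- what changed: B replaces A's nested all-pairs loop by counting each strategy once and applying a closed-form score per player; Pre_ only requires distinct keys, since the association list stands for a Python dict, which cannot hold duplicate keys.
import Mathlib
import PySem

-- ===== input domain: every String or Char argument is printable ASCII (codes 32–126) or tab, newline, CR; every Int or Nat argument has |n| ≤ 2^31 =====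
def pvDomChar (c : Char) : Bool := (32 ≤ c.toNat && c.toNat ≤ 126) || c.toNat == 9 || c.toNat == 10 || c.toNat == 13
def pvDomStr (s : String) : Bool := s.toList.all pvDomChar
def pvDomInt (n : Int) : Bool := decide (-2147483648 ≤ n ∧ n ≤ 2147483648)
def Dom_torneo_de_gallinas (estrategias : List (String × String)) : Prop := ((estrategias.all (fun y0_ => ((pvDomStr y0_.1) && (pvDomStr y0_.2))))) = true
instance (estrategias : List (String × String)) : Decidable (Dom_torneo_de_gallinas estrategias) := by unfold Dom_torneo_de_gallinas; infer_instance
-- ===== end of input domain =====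

-- B counts players per strategy once and scores each player by a closed formula (O(n)) instead of A's all-pairs loop (O(n^2)).


-- ===== PORT A =====
-- inner-loop body of A: the chained if/elif over one opponent (jugador2, estrategia2)
def pvStepA (jugador1 estrategia1 : String) (res : PySem.Dict String Int)
    (q : String × String) : PySem.Dict String Int :=
  if ¬ (jugador1 = q.1) then
    if estrategia1 = "me desvio siempre" ∧ estrategia1 = q.2 then
      res.modify jugador1 0 (· + (-10))
    else if estrategia1 = "me la banco y no me desvio" ∧ estrategia1 = q.2 then
      res.modify jugador1 0 (· + (-5))
    else if estrategia1 = "me desvio siempre" ∧ q.2 = "me la banco y no me desvio" then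
      res.modify jugador1 0 (· + (-15))
    else if estrategia1 = "me la banco y no me desvio" ∧ q.2 = "me desvio siempre" then
      res.modify jugador1 0 (· + 10)
    else res
  else res

def torneo_de_gallinas (estrategias : List (String × String)) : List (String × Int) :=
  (estrategias.foldl
    (fun res p => estrategias.foldl (pvStepA p.1 p.2) (res.insert p.1 0))
    PySem.Dict.empty).items

-- ===== PORT B =====
def torneo_de_gallinas_alt (estrategias : List (String × String)) : List (String × Int) :=
  let cDesvio : Int := estrategias.countP (fun p => p.2 = "me desvio siempre")
  let cBanco : Int := estrategias.countP (fun p => p.2 = "me la banco y no me desvio")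
  estrategias.map (fun p =>
    (p.1,
      if p.2 = "me desvio siempre" then -10 * (cDesvio - 1) - 15 * cBanco
      else if p.2 = "me la banco y no me desvio" then -5 * (cBanco - 1) + 10 * cDesvio
      else 0))

-- ===== PRECONDITION & SPEC =====
-- Pre_ requires the player names (keys) to be pairwise distinct: the association list stands for the
-- Python dict parameter, and a Python dict cannot hold two entries with the same key.
def Pre_torneo_de_gallinas (estrategias : List (String × String)) : Prop :=
  (estrategias.map Prod.fst).Nodup
instance (estrategias : List (String × String)) : Decidable (Pre_torneo_de_gallinas estrategias) := by
  unfold Pre_torneo_de_gallinas; infer_instance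

def pvWitness_torneo_de_gallinas : (List (String × String)) :=
  [("ana", "me desvio siempre"), ("bob", "me la banco y no me desvio"), ("eva", "paso")]

def Spec_torneo_de_gallinas (estrategias : List (String × String)) (out : List (String × Int)) : Prop := out = torneo_de_gallinas_alt estrategias
instance (estrategias : List (String × String)) (out : List (String × Int)) : Decidable (Spec_torneo_de_gallinas estrategias out) := by unfold Spec_torneo_de_gallinas; infer_instance

-- ===== CLAIM (what is proved, stated in full; the proofs are below) =====
def Claim_equal_torneo_de_gallinas : Prop := ∀ (estrategias : List (String × String)), Dom_torneo_de_gallinas estrategias → Pre_torneo_de_gallinas estrategias → Spec_torneo_de_gallinas estrategias (torneo_de_gallinas estrategias)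

-- ===== LEMMAS AND PROOFS =====

-- payoff of strategy s1 against s2, read off A's if/elif chain
def pvDelta (s1 s2 : String) : Int :=
  if s1 = "me desvio siempre" ∧ s1 = s2 then -10
  else if s1 = "me la banco y no me desvio" ∧ s1 = s2 then -5
  else if s1 = "me desvio siempre" ∧ s2 = "me la banco y no me desvio" then -15
  else if s1 = "me la banco y no me desvio" ∧ s2 = "me desvio siempre" then 10
  else 0

-- total score A's inner loop accumulates for (j1, s1) over opponent list L
def pvS (j1 s1 : String) : List (String × String) → Int
  | [] => 0
  | q :: t => (if j1 = q.1 then 0 else pvDelta s1 q.2) + pvS j1 s1 t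

theorem pvStepA_insert (j1 s1 : String) (d : PySem.Dict String Int) (v : Int)
    (q : String × String) :
    pvStepA j1 s1 (d.insert j1 v) q
      = d.insert j1 (v + (if j1 = q.1 then 0 else pvDelta s1 q.2)) := by
  have key : ∀ c : Int, (d.insert j1 v).modify j1 0 (· + c) = d.insert j1 (v + c) := by
    intro c
    rw [PySem.Dict.modify, PySem.Dict.getD_insert_self, PySem.Dict.insert_insert_self]
  unfold pvStepA pvDelta
  split_ifs <;> simp only [key, add_zero]

theorem pvInner (j1 s1 : String) (L : List (String × String)) :
    ∀ (d : PySem.Dict String Int) (v : Int),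
      L.foldl (pvStepA j1 s1) (d.insert j1 v) = d.insert j1 (v + pvS j1 s1 L) := by
  induction L with
  | nil => intro d v; simp [pvS]
  | cons q t ih =>
      intro d v
      rw [List.foldl_cons, pvStepA_insert, ih, pvS, add_assoc]

theorem pvOuter (L : List (String × String)) :
    ∀ (l2 : List (String × String)) (d : PySem.Dict String Int),
      (∀ q ∈ l2, d.contains q.1 = false) → (l2.map Prod.fst).Nodup →
      (l2.foldl (fun res p => L.foldl (pvStepA p.1 p.2) (res.insert p.1 0)) d).items
        = d.items ++ l2.map (fun p => (p.1, pvS p.1 p.2 L)) := by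
  intro l2
  induction l2 with
  | nil => intro d _ _; simp
  | cons p t ih =>
      intro d hfresh hnd
      rw [List.map_cons, List.nodup_cons] at hnd
      have hpd : d.contains p.1 = false := hfresh p (List.mem_cons_self ..)
      simp only [List.foldl_cons]
      rw [pvInner p.1 p.2 L d 0]
      have hfresh' : ∀ q ∈ t, (d.insert p.1 (0 + pvS p.1 p.2 L)).contains q.1 = false := by
        intro q hq
        rw [PySem.Dict.contains_insert]
        have hne : q.1 ≠ p.1 := by
          intro h
          exact hnd.1 (h ▸ List.mem_map_of_mem hq)
        simp [hne, hfresh q (List.mem_cons_of_mem _ hq)]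
      rw [ih _ hfresh' hnd.2, PySem.Dict.items_insert_of_not_contains _ _ hpd]
      simp

-- splitting a payoff into its "against desvio" and "against banco" parts
theorem pvDelta_decomp (s1 s2 : String) :
    pvDelta s1 s2 = (if s2 = "me desvio siempre" then pvDelta s1 "me desvio siempre" else 0)
      + (if s2 = "me la banco y no me desvio" then pvDelta s1 "me la banco y no me desvio" else 0) := by
  have hDB : ("me desvio siempre" : String) ≠ "me la banco y no me desvio" := by decide
  by_cases hd : s2 = "me desvio siempre" <;> by_cases hb : s2 = "me la banco y no me desvio"
  · exact absurd (hd.symm.trans hb) hDB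
  · rw [hd]; simp
  · rw [hb]; simp
  · rw [if_neg hd, if_neg hb, add_zero]
    unfold pvDelta
    split_ifs with h1 h2 h3 h4
    · exact absurd (h1.2.symm.trans h1.1) hd
    · exact absurd (h2.2.symm.trans h2.1) hb
    · exact absurd h3.2 hb
    · exact absurd h4.2 hd
    · rfl

theorem pvS_not_mem (j1 s1 : String) (L : List (String × String))
    (h : j1 ∉ L.map Prod.fst) :
    pvS j1 s1 L
      = pvDelta s1 "me desvio siempre" * (L.countP (fun p => p.2 = "me desvio siempre") : Int)
      + pvDelta s1 "me la banco y no me desvio" * (L.countP (fun p => p.2 = "me la banco y no me desvio") : Int) := by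
  have hDB : ("me desvio siempre" : String) ≠ "me la banco y no me desvio" := by decide
  induction L with
  | nil => simp [pvS]
  | cons q t ih =>
      simp only [List.map_cons, List.mem_cons, not_or] at h
      have hne : j1 ≠ q.1 := h.1
      rw [pvS, if_neg hne, ih h.2, pvDelta_decomp s1 q.2, List.countP_cons, List.countP_cons]
      by_cases hd : q.2 = "me desvio siempre" <;> by_cases hb : q.2 = "me la banco y no me desvio"
      · exact absurd (hd.symm.trans hb) hDB
      all_goals simp [hd, hb]
      all_goals ring

theorem pvS_mem (j1 s1 : String) (L : List (String × String))
    (hnd : (L.map Prod.fst).Nodup) (hmem : (j1, s1) ∈ L) :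
    pvS j1 s1 L
      = pvDelta s1 "me desvio siempre"
          * ((L.countP (fun p => p.2 = "me desvio siempre") : Int) - (if s1 = "me desvio siempre" then 1 else 0))
      + pvDelta s1 "me la banco y no me desvio"
          * ((L.countP (fun p => p.2 = "me la banco y no me desvio") : Int) - (if s1 = "me la banco y no me desvio" then 1 else 0)) := by
  have hDB : ("me desvio siempre" : String) ≠ "me la banco y no me desvio" := by decide
  induction L with
  | nil => simp at hmem
  | cons q t ih =>
      rw [List.map_cons, List.nodup_cons] at hnd
      rcases List.mem_cons.mp hmem with heq | hmemt
      · have hq1 : q.1 = j1 := by rw [← heq]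
        have hq2 : q.2 = s1 := by rw [← heq]
        rw [pvS, hq1, if_pos rfl, pvS_not_mem j1 s1 t (hq1 ▸ hnd.1),
          List.countP_cons, List.countP_cons, hq2]
        by_cases hd : s1 = "me desvio siempre" <;> by_cases hb : s1 = "me la banco y no me desvio"
        · exact absurd (hd.symm.trans hb) hDB
        all_goals simp [hd, hb]
      · have hj1t : j1 ∈ t.map Prod.fst := List.mem_map_of_mem (f := Prod.fst) hmemt
        have hne : j1 ≠ q.1 := by rintro rfl; exact hnd.1 hj1t
        rw [pvS, if_neg hne, ih hnd.2 hmemt, pvDelta_decomp s1 q.2,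
          List.countP_cons, List.countP_cons]
        by_cases hd : q.2 = "me desvio siempre" <;> by_cases hb : q.2 = "me la banco y no me desvio"
        · exact absurd (hd.symm.trans hb) hDB
        all_goals simp [hd, hb]
        all_goals ring

-- ===== VERDICT (by name: the statement is the Claim_ definition above) =====
theorem torneo_de_gallinas_spec : Claim_equal_torneo_de_gallinas := by
  intro L _ hpre
  unfold Spec_torneo_de_gallinas torneo_de_gallinas torneo_de_gallinas_alt
  rw [pvOuter L L PySem.Dict.empty (fun q _ => PySem.Dict.contains_empty q.1) hpre]
  rw [show (PySem.Dict.empty : PySem.Dict String Int).items = [] from rfl, List.nil_append]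
  apply List.map_congr_left
  intro p hp
  have hs := pvS_mem p.1 p.2 L hpre (by simpa using hp)
  have hDB : ("me desvio siempre" : String) ≠ "me la banco y no me desvio" := by decide
  rw [hs]
  refine Prod.ext rfl ?_
  by_cases hd : p.2 = "me desvio siempre" <;> by_cases hb : p.2 = "me la banco y no me desvio"
  · exact absurd (hd.symm.trans hb) hDB
  all_goals simp [hd, hb, pvDelta]
  all_goals ring
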